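-- pv_equiv track=rewrite | github.com/yuzp1996/letta | .github/scripts/model-sweep/generate_model_sweep_markdown.py | get_support_status
-- ===== SOURCE A (Python) =====
-- def get_support_status(passed_tests, feature_tests):
--     """Determine support status for a feature category."""
--     if not feature_tests:
--         return "❓"  # Unknown - no tests for this feature
--
--     # Filter out error tests when checking for support
--     non_error_tests = [test for test in feature_tests if not test.endswith("_error")]
--     error_tests = [test for test in feature_tests if test.endswith("_error")]
--
--     # Check which non-error tests passed
--     passed_non_error_tests = [test for test in non_error_tests if test in passed_tests]
--
--     # If there are no non-error tests, only error tests, treat as unknown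
--     if not non_error_tests:
--         return "❓"  # Only error tests available
--
--     # Support is based only on non-error tests
--     if len(passed_non_error_tests) == len(non_error_tests):
--         return "✅"  # Full support
--     elif len(passed_non_error_tests) == 0:
--         return "❌"  # No support
--     else:
--         return "⚠️"  # Partial support
-- ===== SOURCE B (Python) =====
-- def get_support_status(passed_tests, feature_tests):
--     """Determine support status for a feature category."""
--     passed = set(passed_tests)
--     seen_pass = False
--     seen_fail = False
--     for test in feature_tests:
--         if test.endswith("_error"):
--             continue
--         if test in passed:
--             seen_pass = True
--         else:
--             seen_fail = True
--         if seen_pass and seen_fail: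
--             return "\u26a0\ufe0f"  # both observed: partial support, stop early
--     if not seen_pass and not seen_fail:
--         return "\u2753"
--     if not seen_fail:
--         return "\u2705"
--     return "\u274c"
-- ===== Notes on version B (the rewrite author's own statement) =====
-- stated objective: faster
-- what changed: Replaces A's three intermediate list comprehensions and length comparisons with an early-exiting boolean state machine: one scan tracking only seen_pass/seen_fail flags against a set built once, returning partial-support as soon as both a passing and a failing non-error test are observed.
import Mathlib
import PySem

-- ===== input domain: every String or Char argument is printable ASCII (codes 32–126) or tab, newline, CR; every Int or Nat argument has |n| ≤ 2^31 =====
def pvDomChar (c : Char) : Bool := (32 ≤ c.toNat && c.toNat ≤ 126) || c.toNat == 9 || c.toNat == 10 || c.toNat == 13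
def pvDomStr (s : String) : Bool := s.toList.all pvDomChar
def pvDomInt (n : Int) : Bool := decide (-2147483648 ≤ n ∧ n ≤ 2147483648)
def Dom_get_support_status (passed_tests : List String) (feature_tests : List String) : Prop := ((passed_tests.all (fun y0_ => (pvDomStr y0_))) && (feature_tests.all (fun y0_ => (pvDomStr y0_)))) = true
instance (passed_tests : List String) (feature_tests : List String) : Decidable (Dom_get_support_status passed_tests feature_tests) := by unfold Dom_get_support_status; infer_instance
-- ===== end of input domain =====

-- B replaces A's three list comprehensions and length comparisons with an early-exiting
-- boolean state machine (seen_pass/seen_fail flags, set membership): faster.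

-- ===== PORT A =====
def get_support_status (passed_tests : List String) (feature_tests : List String) : String :=
  if feature_tests = [] then "❓"
  else
    let non_error_tests := feature_tests.filter (fun test => !(PySem.Str.endswith test "_error"))
    let _error_tests := feature_tests.filter (fun test => PySem.Str.endswith test "_error")
    let passed_non_error_tests := non_error_tests.filter (fun test => passed_tests.contains test)
    if non_error_tests = [] then "❓"
    else if passed_non_error_tests.length = non_error_tests.length then "✅"
    else if passed_non_error_tests.length = 0 then "❌"
    else "⚠️"

-- ===== PORT B =====
-- the for-loop with early return in Source B, as structural recursion over feature_tests
def gssLoop (passed : PySem.Set String) : List String → Bool → Bool → String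
  | [], seen_pass, seen_fail =>
      if !seen_pass && !seen_fail then "❓"
      else if !seen_fail then "✅"
      else "❌"
  | test :: rest, seen_pass, seen_fail =>
      if PySem.Str.endswith test "_error" then gssLoop passed rest seen_pass seen_fail
      else
        let seen_pass' := seen_pass || PySem.Set.contains passed test
        let seen_fail' := seen_fail || !(PySem.Set.contains passed test)
        if seen_pass' && seen_fail' then "⚠️"
        else gssLoop passed rest seen_pass' seen_fail'

def get_support_status_alt (passed_tests : List String) (feature_tests : List String) : String :=
  gssLoop (PySem.Set.ofList passed_tests) feature_tests false false

-- ===== PRECONDITION & SPEC =====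
def Spec_get_support_status (passed_tests : List String) (feature_tests : List String) (out : String) : Prop := out = get_support_status_alt passed_tests feature_tests
instance (passed_tests : List String) (feature_tests : List String) (out : String) : Decidable (Spec_get_support_status passed_tests feature_tests out) := by unfold Spec_get_support_status; infer_instance

-- ===== CLAIM (what is proved, stated in full; the proofs are below) =====
def Claim_equal_get_support_status : Prop := ∀ (passed_tests : List String) (feature_tests : List String), Dom_get_support_status passed_tests feature_tests → Spec_get_support_status passed_tests feature_tests (get_support_status passed_tests feature_tests)

-- ===== LEMMAS AND PROOFS =====

-- Closed form of the loop: provided the flags are not both set on entry, the loop returns the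
-- classification determined by whether a passing / failing non-error test occurs in the rest.
theorem gssLoop_eq (p : List String) (l : List String) (sp sf : Bool)
    (h : (sp && sf) = false) :
    gssLoop (PySem.Set.ofList p) l sp sf =
      (let SP := sp || l.any (fun t => !(PySem.Str.endswith t "_error") && p.contains t)
       let SF := sf || l.any (fun t => !(PySem.Str.endswith t "_error") && !(p.contains t))
       if SP && SF then "⚠️"
       else if SP then "✅"
       else if SF then "❌"
       else "❓") := by
  induction l generalizing sp sf with
  | nil =>
      cases sp <;> cases sf <;> simp_all [gssLoop]
  | cons x xs ih =>
      have hmem : PySem.Set.contains (PySem.Set.ofList p) x = p.contains x := by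
        simp [PySem.Set.contains_eq_listContains, PySem.Set.mem_ofList]
      simp only [gssLoop, hmem]
      cases he : PySem.Str.endswith x "_error" with
      | true =>
          rw [if_pos rfl, ih sp sf h]
          simp only [List.any_cons, he, Bool.not_true, Bool.false_and, Bool.false_or]
      | false =>
          rw [if_neg (by decide)]
          cases hp : p.contains x with
          | true =>
              cases sp <;> cases sf <;> simp_all [List.any_cons]
          | false =>
              cases sp <;> cases sf <;> simp_all [List.any_cons]

theorem get_support_status_eq (p f : List String) :
    get_support_status p f = get_support_status_alt p f := by
  unfold get_support_status get_support_status_alt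
  rw [gssLoop_eq p f false false rfl]
  simp only [Bool.false_or]
  set errF := fun t => !(PySem.Str.endswith t "_error") with herrF
  have hanyP : (f.any fun t => !(PySem.Str.endswith t "_error") && p.contains t)
      = (f.filter errF).any (fun t => p.contains t) := by
    simp [List.any_filter, herrF]
  have hanyF : (f.any fun t => !(PySem.Str.endswith t "_error") && !(p.contains t))
      = (f.filter errF).any (fun t => !(p.contains t)) := by
    simp [List.any_filter, herrF]
  rw [hanyP, hanyF]
  set ne := f.filter errF with hne
  set pne := ne.filter (fun t => p.contains t) with hpne
  by_cases hf0 : f = []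
  · subst hf0; simp [hne]
  · rw [if_neg hf0]
    by_cases h0 : ne = []
    · simp [h0]
    · rw [if_neg h0]
      have hSP : (ne.any fun t => p.contains t) = (pne.length ≠ 0 : Bool) := by
        cases hx : ne.any fun t => p.contains t
        · simp only [List.any_eq_false] at hx
          have hnil : pne = [] := by
            rw [hpne, List.filter_eq_nil_iff]
            intro a ha hc
            exact absurd hc (by simpa using hx a ha)
          simp [hnil]
        · obtain ⟨a, ha, hc⟩ : ∃ x ∈ ne, p.contains x = true := by
            simpa [List.any_eq_true] using hx
          have hmem : a ∈ pne := by rw [hpne]; exact List.mem_filter.2 ⟨ha, hc⟩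
          have hnn : pne ≠ [] := by intro hh; rw [hh] at hmem; exact absurd hmem (List.not_mem_nil)
          simp [List.length_eq_zero_iff, hnn]
      have hSF : (ne.any fun t => !(p.contains t)) = (pne.length ≠ ne.length : Bool) := by
        cases hx : ne.any fun t => !(p.contains t)
        · have hall : ∀ a ∈ ne, p.contains a = true := by
            intro a ha
            by_contra hc
            have : (ne.any fun t => !(p.contains t)) = true := by
              simp only [List.any_eq_true]
              exact ⟨a, ha, by simpa using hc⟩
            rw [hx] at this; exact absurd this (by decide)
          have heq : pne = ne := by rw [hpne]; exact List.filter_eq_self.2 hall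
          simp [heq]
        · obtain ⟨a, ha, hc⟩ : ∃ x ∈ ne, (!(p.contains x)) = true := by
            simpa only [List.any_eq_true] using hx
          have hlt : pne.length < ne.length := by
            rw [hpne]
            exact List.length_filter_lt_length_iff_exists.2 ⟨a, ha, by simpa using hc⟩
          simp [Nat.ne_of_lt hlt]
      rw [hSP, hSF]
      by_cases hz : pne.length = 0 <;> by_cases heq : pne.length = ne.length <;>
        simp_all [List.length_eq_zero_iff]

-- ===== VERDICT (by name: the statement is the Claim_ definition above) =====
theorem get_support_status_spec : Claim_equal_get_support_status := by
  intro p f _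
  exact get_support_status_eq p f
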